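-- pv_equiv track=rewrite | github.com/ensk26/algorithm-study | python/baekjoon/1007_1.py | solution
-- ===== SOURCE A (Python) =====
-- def solution(n, m, arr):
--     answer = 0
--     train = [0 for _ in range(n)]
--
--     for i in range(m):
--         if arr[i][0] == 1:  # 해당 위치 탑승
--             train[arr[i][1] - 1] |= (1 << arr[i][2] - 1)  # 0부터 시작
--
--         elif arr[i][0] == 2:  # 해당 위치 하차
--             train[arr[i][1] - 1] &= ~(1 << arr[i][2] - 1)
--
--         elif arr[i][0] == 3:  # 뒤로
--             train[arr[i][1] - 1] = train[arr[i][1] - 1] << 1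
--             train[arr[i][1] - 1] &= ~(1 << 20)  # 20자리
--
--         else:  # 앞으로
--             train[arr[i][1] - 1] = train[arr[i][1] - 1] >> 1
--
--     answer = len(set(train))
--
--     return answer
-- ===== SOURCE B (Python) =====
-- def solution(n, m, arr):
--     # Bucket the operations by train (Python list indexing, so negative train
--     # indices behave exactly as A's train[...] updates), then compute each
--     # train's final bitmask by an independent fold over its own operations.
--     buckets = [[] for _ in range(n)]
--     for i in range(m):
--         buckets[arr[i][1] - 1].append(arr[i])
--
--     def final_mask(ops):
--         mask = 0
--         for row in ops:
--             op = row[0]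
--             if op == 1:
--                 mask |= 1 << (row[2] - 1)
--             elif op == 2:
--                 mask &= ~(1 << (row[2] - 1))
--             elif op == 3:
--                 mask = (mask << 1) & ~(1 << 20)
--             else:
--                 mask >>= 1
--         return mask
--
--     return len({final_mask(ops) for ops in buckets})
-- ===== Notes on version B (the rewrite author's own statement) =====
-- stated objective: alternative
-- what changed: B first buckets the m operations by train and then computes each train's final bitmask by an independent fold over its own operation list before counting distinct masks, instead of A's single interleaved pass that mutates an array of n masks in place; operations on different trains commute, so the result is identical.
import Mathlib
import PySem

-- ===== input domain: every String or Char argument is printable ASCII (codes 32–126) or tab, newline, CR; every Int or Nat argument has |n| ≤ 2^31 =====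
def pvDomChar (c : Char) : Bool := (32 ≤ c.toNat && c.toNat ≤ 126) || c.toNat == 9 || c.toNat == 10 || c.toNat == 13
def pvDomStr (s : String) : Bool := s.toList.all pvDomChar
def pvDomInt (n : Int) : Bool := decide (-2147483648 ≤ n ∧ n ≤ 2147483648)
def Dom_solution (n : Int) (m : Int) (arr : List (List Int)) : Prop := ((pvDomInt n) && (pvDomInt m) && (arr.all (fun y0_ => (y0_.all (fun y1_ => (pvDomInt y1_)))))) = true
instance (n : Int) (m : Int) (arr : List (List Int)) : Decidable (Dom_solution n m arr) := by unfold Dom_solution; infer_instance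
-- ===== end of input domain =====

-- B buckets the operations by train and folds each train's own operation list
-- independently, instead of A's interleaved pass over a mutable array of masks
-- (objective: alternative; same cost).

-- ===== PORT A =====
-- one loop iteration of A (the body of 'for i in range(m)'); arr[i][j] is re-read
-- at each use, exactly as the Python indexes
def stepA (arr : List (List Int)) (train : List Int) (i : Int) : List Int :=
  if PySem.List.pyGetD (PySem.List.pyGetD arr i []) 0 0 = 1 then
    PySem.List.pySetD train (PySem.List.pyGetD (PySem.List.pyGetD arr i []) 1 0 - 1)
      (PySem.Int.bor
        (PySem.List.pyGetD train (PySem.List.pyGetD (PySem.List.pyGetD arr i []) 1 0 - 1) 0)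
        ((1 : Int) <<< (PySem.List.pyGetD (PySem.List.pyGetD arr i []) 2 0 - 1).toNat))
  else if PySem.List.pyGetD (PySem.List.pyGetD arr i []) 0 0 = 2 then
    PySem.List.pySetD train (PySem.List.pyGetD (PySem.List.pyGetD arr i []) 1 0 - 1)
      (PySem.Int.band
        (PySem.List.pyGetD train (PySem.List.pyGetD (PySem.List.pyGetD arr i []) 1 0 - 1) 0)
        (Int.not ((1 : Int) <<< (PySem.List.pyGetD (PySem.List.pyGetD arr i []) 2 0 - 1).toNat)))
  else if PySem.List.pyGetD (PySem.List.pyGetD arr i []) 0 0 = 3 then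
    PySem.List.pySetD
      (PySem.List.pySetD train (PySem.List.pyGetD (PySem.List.pyGetD arr i []) 1 0 - 1)
        ((PySem.List.pyGetD train (PySem.List.pyGetD (PySem.List.pyGetD arr i []) 1 0 - 1) 0) <<< (1 : ℕ)))
      (PySem.List.pyGetD (PySem.List.pyGetD arr i []) 1 0 - 1)
      (PySem.Int.band
        (PySem.List.pyGetD
          (PySem.List.pySetD train (PySem.List.pyGetD (PySem.List.pyGetD arr i []) 1 0 - 1)
            ((PySem.List.pyGetD train (PySem.List.pyGetD (PySem.List.pyGetD arr i []) 1 0 - 1) 0) <<< (1 : ℕ)))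
          (PySem.List.pyGetD (PySem.List.pyGetD arr i []) 1 0 - 1) 0)
        (Int.not ((1 : Int) <<< (20 : ℕ))))
  else
    PySem.List.pySetD train (PySem.List.pyGetD (PySem.List.pyGetD arr i []) 1 0 - 1)
      ((PySem.List.pyGetD train (PySem.List.pyGetD (PySem.List.pyGetD arr i []) 1 0 - 1) 0) >>> (1 : ℕ))

def solution (n : Int) (m : Int) (arr : List (List Int)) : Int :=
  let train := (PySem.List.pyRange 0 n 1).map (fun _ => (0 : Int))
  let train := (PySem.List.pyRange 0 m 1).foldl (stepA arr) train
  ((PySem.Set.ofList train).length : Int)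

-- ===== PORT B =====
-- bucketing pass: buckets[arr[i][1] - 1].append(arr[i])
def bucketStep (arr : List (List Int)) (buckets : List (List (List Int))) (i : Int) :
    List (List (List Int)) :=
  PySem.List.pySetD buckets (PySem.List.pyGetD (PySem.List.pyGetD arr i []) 1 0 - 1)
    (PySem.List.pyGetD buckets (PySem.List.pyGetD (PySem.List.pyGetD arr i []) 1 0 - 1) []
      ++ [PySem.List.pyGetD arr i []])

-- one iteration of final_mask's loop over a single train's operations
def maskStep (mask : Int) (row : List Int) : Int :=
  if PySem.List.pyGetD row 0 0 = 1 then
    PySem.Int.bor mask ((1 : Int) <<< (PySem.List.pyGetD row 2 0 - 1).toNat)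
  else if PySem.List.pyGetD row 0 0 = 2 then
    PySem.Int.band mask (Int.not ((1 : Int) <<< (PySem.List.pyGetD row 2 0 - 1).toNat))
  else if PySem.List.pyGetD row 0 0 = 3 then
    PySem.Int.band (mask <<< (1 : ℕ)) (Int.not ((1 : Int) <<< (20 : ℕ)))
  else
    mask >>> (1 : ℕ)

def finalMask (ops : List (List Int)) : Int := ops.foldl maskStep 0

def solution_alt (n : Int) (m : Int) (arr : List (List Int)) : Int :=
  let buckets := (PySem.List.pyRange 0 n 1).map (fun _ => ([] : List (List Int)))
  let buckets := (PySem.List.pyRange 0 m 1).foldl (bucketStep arr) buckets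
  ((PySem.Set.ofList (buckets.map finalMask)).length : Int)

-- ===== PRECONDITION & SPEC =====
-- Pre_ excludes exactly the inputs where A raises: an operation index beyond the
-- end of arr (IndexError), a row with fewer than 2 entries (IndexError), a train
-- number out of Python list range (IndexError), and for ops 1/2 a missing seat
-- entry (IndexError) or a non-positive seat number (negative-shift ValueError).
def Pre_solution (n : Int) (m : Int) (arr : List (List Int)) : Prop :=
  m ≤ (arr.length : Int) ∧
  ∀ row ∈ arr.take m.toNat,
    2 ≤ row.length ∧
    PySem.Raise.InRange n.toNat (row.getD 1 0 - 1) ∧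
    ((row.getD 0 0 = 1 ∨ row.getD 0 0 = 2) → (3 ≤ row.length ∧ 1 ≤ row.getD 2 0))
instance (n : Int) (m : Int) (arr : List (List Int)) : Decidable (Pre_solution n m arr) := by
  unfold Pre_solution PySem.Raise.InRange; infer_instance
def pvWitness_solution : Int × Int × List (List Int) := (2, 3, [[1, 1, 3], [3, 1, 0], [2, 2, 5]])

def Spec_solution (n : Int) (m : Int) (arr : List (List Int)) (out : Int) : Prop := out = solution_alt n m arr
instance (n : Int) (m : Int) (arr : List (List Int)) (out : Int) : Decidable (Spec_solution n m arr out) := by unfold Spec_solution; infer_instance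

-- ===== CLAIM (what is proved, stated in full; the proofs are below) =====
def Claim_equal_solution : Prop := ∀ (n : Int) (m : Int) (arr : List (List Int)), Dom_solution n m arr → Pre_solution n m arr → Spec_solution n m arr (solution n m arr)

-- ===== LEMMAS AND PROOFS =====

def pvIdx (len : ℕ) (i : ℤ) : ℕ := if 0 ≤ i then i.toNat else len - (-i).toNat

theorem pv_pyIdx {len : ℕ} {i : ℤ} (h : PySem.Raise.InRange len i) :
    PySem.List.pyIdx? len i = some (pvIdx len i) ∧ pvIdx len i < len := by
  obtain ⟨h1, h2⟩ := h
  unfold PySem.List.pyIdx? pvIdx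
  split_ifs <;> (try constructor) <;> (try rfl) <;> omega

theorem pv_pyGetD {α : Type} (xs : List α) (i : ℤ) (d : α)
    (h : PySem.Raise.InRange xs.length i) :
    PySem.List.pyGetD xs i d = xs.getD (pvIdx xs.length i) d := by
  obtain ⟨he, hlt⟩ := pv_pyIdx h
  unfold PySem.List.pyGetD PySem.List.pyGet?
  rw [he]
  simp [List.getD_eq_getElem?_getD]

theorem pv_pySetD {α : Type} (xs : List α) (i : ℤ) (v : α)
    (h : PySem.Raise.InRange xs.length i) :
    PySem.List.pySetD xs i v = xs.set (pvIdx xs.length i) v := by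
  obtain ⟨he, _⟩ := pv_pyIdx h
  unfold PySem.List.pySetD PySem.List.pySet?
  rw [he]
  rfl

theorem pv_idx_nat (len : ℕ) (kk : ℕ) : pvIdx len (kk : ℤ) = kk := by
  unfold pvIdx
  rw [if_pos (by positivity)]
  simp

theorem pv_getD_map (buckets : List (List (List Int))) (k : ℕ) (hk : k < buckets.length) :
    (buckets.map finalMask).getD k 0 = finalMask (buckets.getD k []) := by
  rw [List.getD_eq_getElem _ _ (by simpa using hk), List.getD_eq_getElem _ _ hk]
  simp

theorem pv_finalMask_snoc (ops : List (List Int)) (row : List Int) :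
    finalMask (ops ++ [row]) = maskStep (finalMask ops) row := by
  unfold finalMask
  rw [List.foldl_append]
  rfl

-- A's loop body, rewritten as a single set of the affected train's mask
theorem pv_stepA_eq {arr : List (List Int)} {i n : Int} {train : List Int} {row : List Int}
    (hrow : PySem.List.pyGetD arr i [] = row)
    (hlen : train.length = n.toNat)
    (hrB : PySem.Raise.InRange n.toNat (row.getD 1 0 - 1))
    (hr2 : 2 ≤ row.length) :
    stepA arr train i =
      train.set (pvIdx n.toNat (row.getD 1 0 - 1))
        (maskStep (train.getD (pvIdx n.toNat (row.getD 1 0 - 1)) 0) row) := by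
  have hk : pvIdx n.toNat (row.getD 1 0 - 1) < n.toNat := (pv_pyIdx hrB).2
  have h1 : PySem.List.pyGetD row 1 0 = row.getD 1 0 := by
    rw [show (1:ℤ) = ((1:ℕ):ℤ) from rfl, pv_pyGetD _ _ _ ⟨by omega, by simp; omega⟩, pv_idx_nat]
  have hgA : PySem.List.pyGetD train (row.getD 1 0 - 1) 0 =
      train.getD (pvIdx n.toNat (row.getD 1 0 - 1)) 0 := by
    rw [pv_pyGetD _ _ _ (by rw [hlen]; exact hrB), hlen]
  have hsA : ∀ v, PySem.List.pySetD train (row.getD 1 0 - 1) v =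
      train.set (pvIdx n.toNat (row.getD 1 0 - 1)) v := by
    intro v; rw [pv_pySetD _ _ _ (by rw [hlen]; exact hrB), hlen]
  unfold stepA maskStep
  rw [hrow, h1]
  by_cases hop1 : PySem.List.pyGetD row 0 0 = 1
  · rw [if_pos hop1, if_pos hop1, hgA, hsA]
  · by_cases hop2 : PySem.List.pyGetD row 0 0 = 2
    · rw [if_neg hop1, if_neg hop1, if_pos hop2, if_pos hop2, hgA, hsA]
    · by_cases hop3 : PySem.List.pyGetD row 0 0 = 3
      · rw [if_neg hop1, if_neg hop1, if_neg hop2, if_neg hop2, if_pos hop3, if_pos hop3,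
          hgA, hsA]
        have hg2 : PySem.List.pyGetD
            (train.set (pvIdx n.toNat (row.getD 1 0 - 1)) (train.getD (pvIdx n.toNat (row.getD 1 0 - 1)) 0 <<< (1:ℕ)))
            (row.getD 1 0 - 1) 0 =
            train.getD (pvIdx n.toNat (row.getD 1 0 - 1)) 0 <<< (1:ℕ) := by
          rw [pv_pyGetD _ _ _ (by rw [List.length_set, hlen]; exact hrB), List.length_set, hlen,
            List.getD_eq_getElem _ _ (by rw [List.length_set, hlen]; exact hk)]
          exact List.getElem_set_self _
        have hs2 : ∀ v, PySem.List.pySetD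
            (train.set (pvIdx n.toNat (row.getD 1 0 - 1)) (train.getD (pvIdx n.toNat (row.getD 1 0 - 1)) 0 <<< (1:ℕ)))
            (row.getD 1 0 - 1) v =
            (train.set (pvIdx n.toNat (row.getD 1 0 - 1)) (train.getD (pvIdx n.toNat (row.getD 1 0 - 1)) 0 <<< (1:ℕ))).set
              (pvIdx n.toNat (row.getD 1 0 - 1)) v := by
          intro v
          rw [pv_pySetD _ _ _ (by rw [List.length_set, hlen]; exact hrB), List.length_set, hlen]
        rw [hg2, hs2, List.set_set]
      · rw [if_neg hop1, if_neg hop1, if_neg hop2, if_neg hop2, if_neg hop3, if_neg hop3,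
          hgA, hsA]

-- B's bucketing body, rewritten as a single set of the affected bucket
theorem pv_bucketStep_eq {arr : List (List Int)} {i n : Int}
    {buckets : List (List (List Int))} {row : List Int}
    (hrow : PySem.List.pyGetD arr i [] = row)
    (hlen : buckets.length = n.toNat)
    (hrB : PySem.Raise.InRange n.toNat (row.getD 1 0 - 1))
    (hr2 : 2 ≤ row.length) :
    bucketStep arr buckets i =
      buckets.set (pvIdx n.toNat (row.getD 1 0 - 1))
        (buckets.getD (pvIdx n.toNat (row.getD 1 0 - 1)) [] ++ [row]) := by
  have h1 : PySem.List.pyGetD row 1 0 = row.getD 1 0 := by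
    rw [show (1:ℤ) = ((1:ℕ):ℤ) from rfl, pv_pyGetD _ _ _ ⟨by omega, by simp; omega⟩, pv_idx_nat]
  unfold bucketStep
  rw [hrow, h1, pv_pyGetD _ _ _ (by rw [hlen]; exact hrB),
    pv_pySetD _ _ _ (by rw [hlen]; exact hrB), hlen]

theorem pv_stepA_length (arr : List (List ℤ)) (train : List ℤ) (i : ℤ) :
    (stepA arr train i).length = train.length := by
  unfold stepA; split_ifs <;> simp [PySem.List.length_pySetD]

theorem pv_init (l : List ℤ) :
    l.map (fun _ => (0 : ℤ)) = (l.map (fun _ => ([] : List (List ℤ)))).map finalMask := by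
  simp [finalMask]

theorem pv_pyRange_len (n : ℤ) : (PySem.List.pyRange 0 n 1).length = n.toNat := by
  unfold PySem.List.pyRange
  rw [if_neg (by norm_num)]
  simp only [List.length_map, List.length_range]
  split_ifs with h1 h2 <;> omega

theorem pv_mem_pyRange {i m : ℤ} (h : i ∈ PySem.List.pyRange 0 m 1) : 0 ≤ i ∧ i < m := by
  unfold PySem.List.pyRange at h
  rw [if_neg (by norm_num)] at h
  simp only [List.mem_map, List.mem_range] at h
  obtain ⟨k, hk, rfl⟩ := h
  split_ifs at hk <;> omega

-- the invariant: A's mask array is the image of B's bucket array under finalMask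
theorem pv_fold {arr : List (List ℤ)} {n m : ℤ}
    (hrows : ∀ row ∈ arr.take m.toNat,
      2 ≤ row.length ∧
      PySem.Raise.InRange n.toNat (row.getD 1 0 - 1) ∧
      ((row.getD 0 0 = 1 ∨ row.getD 0 0 = 2) → (3 ≤ row.length ∧ 1 ≤ row.getD 2 0)))
    (hm : m ≤ (arr.length : ℤ)) :
    ∀ (is : List ℤ), (∀ i ∈ is, 0 ≤ i ∧ i < m) →
    ∀ {train : List ℤ} {buckets : List (List (List ℤ))},
      train = buckets.map finalMask → train.length = n.toNat →
      is.foldl (stepA arr) train = (is.foldl (bucketStep arr) buckets).map finalMask := by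
  intro is
  induction is with
  | nil => intro _ train buckets hF _; exact hF
  | cons i t ih =>
    intro hmem train buckets hF hlen
    obtain ⟨hi0, him⟩ := hmem i (List.mem_cons_self)
    have hia : i.toNat < arr.length := by omega
    have hrow : PySem.List.pyGetD arr i [] = arr.getD i.toNat [] := by
      rw [pv_pyGetD _ _ _ ⟨by omega, by omega⟩]
      congr 1
      unfold pvIdx
      rw [if_pos hi0]
    have htk : i.toNat < (arr.take m.toNat).length := by
      rw [List.length_take]; omega
    have hmemtake : arr.getD i.toNat [] ∈ arr.take m.toNat := by
      rw [List.getD_eq_getElem _ _ hia, ← List.getElem_take (h := htk)]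
      exact List.getElem_mem htk
    obtain ⟨hr2, hrB, _⟩ := hrows _ hmemtake
    have hblen : buckets.length = n.toNat := by
      rw [← hlen, hF, List.length_map]
    have hk : pvIdx n.toNat ((arr.getD i.toNat []).getD 1 0 - 1) < n.toNat := (pv_pyIdx hrB).2
    simp only [List.foldl_cons]
    refine ih (fun j hj => hmem j (List.mem_cons_of_mem _ hj)) ?_
      (by rw [pv_stepA_length]; exact hlen)
    rw [pv_stepA_eq hrow hlen hrB hr2, pv_bucketStep_eq hrow hblen hrB hr2,
      List.map_set, pv_finalMask_snoc, hF,
      pv_getD_map buckets _ (by rw [hblen]; exact hk)]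

-- ===== VERDICT (by name: the statement is the Claim_ definition above) =====
theorem solution_spec : Claim_equal_solution := by
  intro n m arr hdom hpre
  unfold Spec_solution
  unfold Pre_solution at hpre
  show ((PySem.Set.ofList ((PySem.List.pyRange 0 m 1).foldl (stepA arr)
      ((PySem.List.pyRange 0 n 1).map (fun _ => (0 : Int))))).length : Int) =
    ((PySem.Set.ofList (((PySem.List.pyRange 0 m 1).foldl (bucketStep arr)
      ((PySem.List.pyRange 0 n 1).map (fun _ => ([] : List (List Int))))).map finalMask)).length : Int)
  rw [pv_fold hpre.2 hpre.1 (PySem.List.pyRange 0 m 1)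
    (fun i hi => pv_mem_pyRange hi)
    (pv_init (PySem.List.pyRange 0 n 1))
    (by rw [List.length_map, pv_pyRange_len])]
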